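-- pv_equiv track=rewrite | github.com/adirz/sample-projects | samle projects/school projects/intro to CS/ex9/hzlib.py | build_canonical_codebook
-- ===== SOURCE A (Python) =====
-- def add_by_len(num, len_a, len_b):
--     ##  adds one in value and than adss zeroes to the binary
--     ##  representation, by length
--     return (num+1)<<(len_a - len_b)
--
-- def build_canonical_codebook(codebook):
--     '''
--     Return a canonical coding table, from a codebook. The
--     canonical coding table holdes 256 notes, each note we
--     use is in the index of its value. Notes' values are
--     given by their commonness.
--     The first character receives coding with the same
--     length where it all zeros. Each character gets the code
--     of the previous character in the series, plus one
--     (adding value, not a bit concatenation). If the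
--     character encoding length is longer than the length of
--     previous character encoding, after adding one, there
--     concatenate zeros right to the desired length encoding'''
--
--     if not codebook:
--         return {}
--     canonical_codebook = {}
--     list_of_elements = []
--     for element in codebook:
--         list_of_elements.append((element, codebook[element]))
--     list_of_elements.sort(key = lambda tup: tup[0])
--     list_of_elements.sort(key = lambda tup: tup[1][0])
--
--     temp_num = (list_of_elements[0][1][0],0)
--     canonical_codebook[list_of_elements[0][0]] = (temp_num[0],temp_num[1])
--     next_one = 0
--     for element, info in list_of_elements[1:]:
--         next_one = add_by_len(next_one, info[0], temp_num[0])
--         canonical_codebook[element] = (info[0], next_one)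
--         temp_num = info
--     return canonical_codebook
-- ===== SOURCE B (Python) =====
-- def build_canonical_codebook(codebook):
--     if not codebook:
--         return {}
--     items = sorted(codebook.items(), key=lambda kv: (kv[1][0], kv[0]))
--     lengths = [info[0] for _, info in items]
--     result = {}
--     for i, (sym, _) in enumerate(items):
--         result[sym] = (lengths[i],
--                        sum(1 << (lengths[i] - lengths[j]) for j in range(i)))
--     return result
-- ===== Notes on version B (the rewrite author's own statement) =====
-- stated objective: alternative
-- what changed: B sorts the items once by the lexicographic key (length, symbol) instead of A's two stable sorting passes, and assigns each symbol its canonical code by the closed form code(i) = sum_{j<i} 2^(L_i - L_j) instead of A's sequential previous-code/shift state machine.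
import Mathlib
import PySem

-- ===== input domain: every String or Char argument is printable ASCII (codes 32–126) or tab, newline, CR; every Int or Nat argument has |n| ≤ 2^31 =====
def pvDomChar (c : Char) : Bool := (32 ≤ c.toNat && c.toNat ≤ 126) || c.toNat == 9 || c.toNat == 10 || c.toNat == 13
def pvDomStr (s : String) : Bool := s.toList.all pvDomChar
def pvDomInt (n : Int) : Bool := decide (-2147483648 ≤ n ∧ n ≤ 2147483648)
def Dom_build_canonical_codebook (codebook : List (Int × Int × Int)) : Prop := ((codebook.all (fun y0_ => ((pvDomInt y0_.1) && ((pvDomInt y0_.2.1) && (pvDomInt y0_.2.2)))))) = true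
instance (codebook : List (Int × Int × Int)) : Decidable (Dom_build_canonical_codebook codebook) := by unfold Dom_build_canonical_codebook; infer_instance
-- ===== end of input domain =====

-- B replaces A's sequential previous-code state machine by the closed form
-- code(i) = Σ_{j<i} 2^(L_i − L_j) over a single (length, symbol)-lex sort (alternative, not faster).

-- ===== PORT A =====
-- Python '<<': the shift amount len_a - len_b is nonnegative at every call A makes
-- (the list is sorted by code length), where '.toNat' is exact.
def add_by_len (num len_a len_b : Int) : Int := (num + 1) <<< (len_a - len_b).toNat

def build_canonical_codebook (codebook : List (Int × Int × Int)) : List (Int × Int × Int) :=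
  if codebook = [] then []
  else
    let d : PySem.Dict Int (Int × Int) := PySem.Dict.mk codebook
    let list_of_elements := d.keys.foldl (fun acc k => acc ++ [(k, d.getD k (0, 0))]) []
    let s1 := PySem.List.sorted list_of_elements (fun t => t.1) false
    let s := PySem.List.sorted s1 (fun t => t.2.1) false
    match s with
    | [] => []   -- unreachable: codebook ≠ [] keeps s nonempty
    | first :: rest =>
      let temp0 : Int × Int := (first.2.1, 0)
      let cc0 := (PySem.Dict.empty : PySem.Dict Int (Int × Int)).insert first.1 (temp0.1, temp0.2)
      let fin := rest.foldl
        (fun (st : (Int × Int) × Int × PySem.Dict Int (Int × Int)) p =>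
          let next := add_by_len st.2.1 p.2.1 st.1.1
          (p.2, next, st.2.2.insert p.1 (p.2.1, next)))
        (temp0, 0, cc0)
      fin.2.2.items

-- ===== PORT B =====
-- Python '1 << (lengths[i] - lengths[j])': the shift amount is nonnegative for j < i
-- (lengths is sorted ascending), where '.toNat' is exact.
def build_canonical_codebook_alt (codebook : List (Int × Int × Int)) : List (Int × Int × Int) :=
  if codebook = [] then []
  else
    let items := PySem.List.sorted2 (PySem.Dict.mk codebook : PySem.Dict Int (Int × Int)).items
      (fun kv => kv.2.1) (fun kv => kv.1) false
    let lengths := items.map (fun kv => kv.2.1)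
    let result := (PySem.List.enumerate items 0).foldl
      (fun (r : PySem.Dict Int (Int × Int)) ip =>
        r.insert ip.2.1
          (PySem.List.pyGetD lengths ip.1 0,
           ((PySem.List.pyRange 0 ip.1 1).map
             (fun j => (1:Int) <<< (PySem.List.pyGetD lengths ip.1 0 - PySem.List.pyGetD lengths j 0).toNat)).sum))
      PySem.Dict.empty
    result.items

-- ===== PRECONDITION & SPEC =====
-- Pre_ excludes association lists with duplicate keys: they are an ambiguous encoding of
-- A's Python dict argument (a dict cannot hold duplicate keys), so no behaviour is specified there.
def Pre_build_canonical_codebook (codebook : List (Int × Int × Int)) : Prop :=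
  (codebook.map (fun p => p.1)).Nodup
instance (codebook : List (Int × Int × Int)) : Decidable (Pre_build_canonical_codebook codebook) := by
  unfold Pre_build_canonical_codebook; infer_instance

def pvWitness_build_canonical_codebook : (List (Int × Int × Int)) :=
  [(7, 2, 5), (3, 1, 9), (5, 2, 1)]

def Spec_build_canonical_codebook (codebook : List (Int × Int × Int)) (out : List (Int × Int × Int)) : Prop := out = build_canonical_codebook_alt codebook
instance (codebook : List (Int × Int × Int)) (out : List (Int × Int × Int)) : Decidable (Spec_build_canonical_codebook codebook out) := by unfold Spec_build_canonical_codebook; infer_instance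

-- ===== CLAIM (what is proved, stated in full; the proofs are below) =====
def Claim_equal_build_canonical_codebook : Prop := ∀ (codebook : List (Int × Int × Int)), Dom_build_canonical_codebook codebook → Pre_build_canonical_codebook codebook → Spec_build_canonical_codebook codebook (build_canonical_codebook codebook)

-- ===== LEMMAS AND PROOFS =====

-- The strict order both sort phases realise on a duplicate-free codebook:
-- by code length, ties broken by symbol value.
def pvLexR (a b : Int × Int × Int) : Prop :=
  a.2.1 < b.2.1 ∨ (a.2.1 = b.2.1 ∧ a.1 < b.1)

lemma pvLexR_trans {a b c : Int × Int × Int} (h1 : pvLexR a b) (h2 : pvLexR b c) : pvLexR a c := by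
  unfold pvLexR at *; omega

lemma pv_insertBy_pairwise {α : Type} (R : α → α → Prop)
    (htrans : ∀ a b c, R a b → R b c → R a c) (before : α → α → Bool) (x : α) :
    ∀ acc : List α, acc.Pairwise R →
      (∀ y ∈ acc, before x y = true → R x y) →
      (∀ y ∈ acc, before x y = false → R y x) →
      (PySem.List.insertBy before x acc).Pairwise R := by
  intro acc
  induction acc with
  | nil => intro _ _ _; simp [PySem.List.insertBy]
  | cons y ys ih =>
    intro hpw hT hF
    rw [List.pairwise_cons] at hpw
    by_cases hb : before x y = true
    · simp only [PySem.List.insertBy, hb, if_true]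
      refine List.pairwise_cons.mpr ⟨?_, List.pairwise_cons.mpr hpw⟩
      intro z hz
      rcases List.mem_cons.mp hz with rfl | hz
      · exact hT z (by simp) hb
      · exact htrans x y z (hT y (by simp) hb) (hpw.1 z hz)
    · simp only [PySem.List.insertBy, hb]
      refine List.pairwise_cons.mpr ⟨?_, ?_⟩
      · intro z hz
        rcases (PySem.List.mem_insertBy before x z ys).mp hz with rfl | hz
        · exact hF y (by simp) (by simpa using hb)
        · exact hpw.1 z hz
      · exact ih hpw.2 (fun z hz ht => hT z (by simp [hz]) ht)
          (fun z hz hf => hF z (by simp [hz]) hf)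

lemma pv_foldl_insertBy_pairwise {α : Type} (R : α → α → Prop)
    (htrans : ∀ a b c, R a b → R b c → R a c) (before : α → α → Bool)
    (S : α → α → Prop)
    (hcompat : ∀ x y, S y x →
      (before x y = true → R x y) ∧ (before x y = false → R y x)) :
    ∀ (l acc : List α), acc.Pairwise R → (∀ y ∈ acc, ∀ x ∈ l, S y x) →
      l.Pairwise S →
      (l.foldl (fun acc x => PySem.List.insertBy before x acc) acc).Pairwise R := by
  intro l
  induction l with
  | nil => intro acc h _ _; simpa using h
  | cons x l' ih =>
    intro acc hpw hS hl
    rw [List.pairwise_cons] at hl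
    simp only [List.foldl_cons]
    refine ih _ ?_ ?_ hl.2
    · exact pv_insertBy_pairwise R htrans before x acc hpw
        (fun y hy => (hcompat x y (hS y hy x (by simp))).1)
        (fun y hy => (hcompat x y (hS y hy x (by simp))).2)
    · intro y hy z hz
      rcases (PySem.List.mem_insertBy before x y acc).mp hy with rfl | hy
      · exact hl.1 z hz
      · exact hS y hy z (by simp [hz])

-- A's double stable sort is pairwise pvLexR on a duplicate-free codebook.
lemma pv_sortA_pairwise (xs : List (Int × Int × Int))
    (hnd : (xs.map (fun p => p.1)).Nodup) :
    (PySem.List.sorted (PySem.List.sorted xs (fun t => t.1) false)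
      (fun t => t.2.1) false).Pairwise pvLexR := by
  have hperm : (PySem.List.sorted xs (fun t => t.1) false).Perm xs :=
    PySem.List.sorted_perm xs _ false
  have hnd1 : ((PySem.List.sorted xs (fun t => t.1) false).map (fun p => p.1)).Nodup :=
    ((hperm.map (fun p => p.1)).nodup_iff).mpr hnd
  have hle := PySem.List.sorted_pairwise xs (fun t => t.1)
  have hne : (PySem.List.sorted xs (fun t => t.1) false).Pairwise
      (fun a b => a.1 ≠ b.1) := by
    rw [List.nodup_iff_pairwise_ne] at hnd1
    exact (List.pairwise_map.mp hnd1)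
  have hlt : (PySem.List.sorted xs (fun t => t.1) false).Pairwise
      (fun a b => a.1 < b.1) :=
    (hle.and hne).imp (fun h => lt_of_le_of_ne h.1 h.2)
  rw [PySem.List.sorted_eq_foldl_insertBy]
  refine pv_foldl_insertBy_pairwise pvLexR (fun a b c => pvLexR_trans)
    _ (fun y x => y.1 < x.1) ?_ _ [] (by simp) (by simp) hlt
  intro x y hS
  constructor
  · intro h
    left; exact of_decide_eq_true h
  · intro h
    have := of_decide_eq_false h
    unfold pvLexR; omega

-- B's single lex sort is pairwise pvLexR on a duplicate-free codebook.
lemma pv_sortB_pairwise (xs : List (Int × Int × Int))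
    (hnd : (xs.map (fun p => p.1)).Nodup) :
    (PySem.List.sorted2 xs (fun kv => kv.2.1) (fun kv => kv.1) false).Pairwise pvLexR := by
  have hne : xs.Pairwise (fun a b => a.1 ≠ b.1) := by
    rw [List.nodup_iff_pairwise_ne] at hnd
    exact (List.pairwise_map.mp hnd)
  unfold PySem.List.sorted2
  simp only [if_neg (by decide : ¬ (false = true))]
  refine pv_foldl_insertBy_pairwise pvLexR (fun a b c => pvLexR_trans)
    _ (fun y x => y.1 ≠ x.1) ?_ _ [] (by simp) (by simp) hne
  intro x y hS
  constructor
  · intro h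
    simp only [Bool.or_eq_true, Bool.and_eq_true, Bool.not_eq_true',
      decide_eq_true_eq, decide_eq_false_iff_not] at h
    unfold pvLexR; omega
  · intro h
    simp only [Bool.or_eq_false_iff, Bool.and_eq_false_iff, Bool.not_eq_false',
      decide_eq_false_iff_not, decide_eq_true_eq] at h
    have : y.1 ≠ x.1 := hS
    unfold pvLexR; omega

lemma pv_sort_eq (xs : List (Int × Int × Int))
    (hnd : (xs.map (fun p => p.1)).Nodup) :
    PySem.List.sorted (PySem.List.sorted xs (fun t => t.1) false) (fun t => t.2.1) false
      = PySem.List.sorted2 xs (fun kv => kv.2.1) (fun kv => kv.1) false := by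
  apply List.Perm.eq_of_pairwise (le := pvLexR) ?_ ?_ ?_ ?_
  · intro a b _ _ h1 h2
    exfalso; unfold pvLexR at h1 h2; omega
  · exact pv_sortA_pairwise xs hnd
  · exact pv_sortB_pairwise xs hnd
  · exact ((PySem.List.sorted_perm _ _ false).trans (PySem.List.sorted_perm xs _ false)).trans
      (PySem.List.sorted2_perm xs _ _ false).symm

-- A's loop, as the code list it produces.
def pvCodesFrom (tl next : Int) : List (Int × Int × Int) → List (Int × Int × Int)
  | [] => []
  | p :: r =>
    let n := add_by_len next p.2.1 tl
    (p.1, p.2.1, n) :: pvCodesFrom p.2.1 n r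

lemma pv_aloop_items :
    ∀ (rest : List (Int × Int × Int)) (temp : Int × Int) (next : Int)
      (d : PySem.Dict Int (Int × Int)),
      (∀ p ∈ rest, d.contains p.1 = false) →
      (rest.map (fun p => p.1)).Nodup →
      ((rest.foldl
        (fun (st : (Int × Int) × Int × PySem.Dict Int (Int × Int)) p =>
          let next := add_by_len st.2.1 p.2.1 st.1.1
          (p.2, next, st.2.2.insert p.1 (p.2.1, next)))
        (temp, next, d)).2.2).items = d.items ++ pvCodesFrom temp.1 next rest := by
  intro rest
  induction rest with
  | nil => intro temp next d _ _; simp [pvCodesFrom]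
  | cons p r ih =>
    intro temp next d hfresh hnd
    simp only [List.foldl_cons]
    rw [ih p.2 (add_by_len next p.2.1 temp.1) _ ?_ ?_]
    · rw [PySem.Dict.items_insert_of_not_contains d _ (hfresh p (by simp))]
      simp [pvCodesFrom]
    · intro q hq
      rw [PySem.Dict.contains_insert]
      have h1 : d.contains q.1 = false := hfresh q (by simp [hq])
      have h2 : q.1 ≠ p.1 := by
        rcases List.pairwise_cons.mp (List.pairwise_map.mp hnd) with ⟨h, _⟩
        exact fun he => (h q hq) he.symm
      simp [h1, h2]
    · exact (List.pairwise_map.mp hnd).sublist (List.sublist_cons_self p r) |> List.pairwise_map.mpr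

lemma pv_map_range_getD (P : List Int) (f : Int → Int) :
    (List.range P.length).map (fun j => f (P.getD j 0)) = P.map f := by
  apply List.ext_getElem
  · simp
  · intro i h1 h2
    simp only [List.getElem_map, List.getElem_range]
    rw [List.getD_eq_getElem P 0 (by simpa using h2)]

lemma pv_sum_shift_merge (P : List Int) (t l : Int)
    (hmem : ∀ x ∈ P, x ≤ t) (htl : t ≤ l) :
    (P.map (fun x => (1:Int) <<< (t - x).toNat)).sum * 2 ^ (l - t).toNat
      = (P.map (fun x => (1:Int) <<< (l - x).toNat)).sum := by
  rw [← List.sum_map_mul_right]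
  congr 1
  apply List.map_congr_left
  intro x hx
  have hxt : x ≤ t := hmem x hx
  rw [Int.shiftLeft_eq, Int.shiftLeft_eq, one_mul, one_mul, ← pow_add]
  congr 1
  omega

-- The bridge: A's sequential codes are B's closed-form codes, on a
-- length-sorted list.
lemma pv_bridge (L : List Int) :
    ∀ (rest : List (Int × Int × Int)) (P : List Int) (t next : Int),
      L = P ++ rest.map (fun p => p.2.1) →
      (∀ x ∈ P, x ≤ t) →
      (∀ p ∈ rest, t ≤ p.2.1) →
      (rest.map (fun p => p.2.1)).Pairwise (· ≤ ·) →
      next + 1 = (P.map (fun x => (1:Int) <<< (t - x).toNat)).sum →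
      pvCodesFrom t next rest
        = (PySem.List.enumerate rest (P.length : Int)).map
            (fun ip => (ip.2.1, PySem.List.pyGetD L ip.1 0,
               ((PySem.List.pyRange 0 ip.1 1).map
                 (fun j => (1:Int) <<< (PySem.List.pyGetD L ip.1 0 - PySem.List.pyGetD L j 0).toNat)).sum)) := by
  intro rest
  induction rest with
  | nil => intro P t next _ _ _ _ _; simp [pvCodesFrom, PySem.List.enumerate]
  | cons p r ih =>
    intro P t next hL hmem hts hsort hnext
    have htl : t ≤ p.2.1 := hts p (by simp)
    -- the value A assigns to p is the closed-form sum over the processed lengths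
    have hn : add_by_len next p.2.1 t
        = (P.map (fun x => (1:Int) <<< (p.2.1 - x).toNat)).sum := by
      unfold add_by_len
      rw [Int.shiftLeft_eq, hnext, pv_sum_shift_merge P t p.2.1 hmem htl]
    -- the length stored at index |P| of L is p's length
    have hgetL : PySem.List.pyGetD L (P.length : Int) 0 = p.2.1 := by
      rw [PySem.List.pyGetD_natCast, hL]
      simp
    -- B's sum at index |P| is the closed-form sum over the processed lengths
    have hsum : ((PySem.List.pyRange 0 (P.length : Int) 1).map
          (fun j => (1:Int) <<< (PySem.List.pyGetD L (P.length : Int) 0 - PySem.List.pyGetD L j 0).toNat)).sum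
        = (P.map (fun x => (1:Int) <<< (p.2.1 - x).toNat)).sum := by
      rw [PySem.List.pyRange_zero_natCast, List.map_map]
      rw [← pv_map_range_getD P (fun x => (1:Int) <<< (p.2.1 - x).toNat)]
      congr 1
      apply List.map_congr_left
      intro j hj
      have hjP : j < P.length := List.mem_range.mp hj
      simp only [Function.comp_apply, PySem.List.pyGetD_natCast, hgetL]
      rw [hL, List.getD_append _ _ _ _ hjP]
    -- assemble: head then tail via the induction hypothesis
    rw [PySem.List.enumerate_cons]
    simp only [List.map_cons]
    have htail : pvCodesFrom p.2.1 (add_by_len next p.2.1 t) r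
        = (PySem.List.enumerate r ((P.length : Int) + 1)).map
            (fun ip => (ip.2.1, PySem.List.pyGetD L ip.1 0,
               ((PySem.List.pyRange 0 ip.1 1).map
                 (fun j => (1:Int) <<< (PySem.List.pyGetD L ip.1 0 - PySem.List.pyGetD L j 0).toNat)).sum)) := by
      have hστ := ih (P ++ [p.2.1]) p.2.1 (add_by_len next p.2.1 t) ?_ ?_ ?_ ?_ ?_
      · rw [hστ]
        congr 1
        simp [List.length_append]
      · rw [hL]; simp
      · intro x hx
        rcases List.mem_append.mp hx with hx | hx
        · exact le_trans (hmem x hx) htl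
        · exact le_of_eq (by simpa using hx)
      · intro q hq
        have := List.pairwise_cons.mp hsort
        exact this.1 q.2.1 (List.mem_map_of_mem hq)
      · exact (List.pairwise_cons.mp hsort).2
      · rw [hn]
        simp [List.map_append]
    rw [pvCodesFrom]
    rw [htail]
    congr 1
    rw [hsum, hgetL, hn]

lemma pv_enumerate_map_keys (xs : List (Int × Int × Int)) (i : Int) :
    (PySem.List.enumerate xs i).map (fun ip => ip.2.1) = xs.map (fun p => p.1) := by
  have h := PySem.List.map_snd_enumerate xs i
  calc (PySem.List.enumerate xs i).map (fun ip => ip.2.1)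
      = ((PySem.List.enumerate xs i).map (fun ip => ip.2)).map (fun p => p.1) := by
        rw [List.map_map]; rfl
    _ = xs.map (fun p => p.1) := by rw [h]

lemma pv_main (codebook : List (Int × Int × Int))
    (hpre : (codebook.map (fun p => p.1)).Nodup) :
    build_canonical_codebook codebook = build_canonical_codebook_alt codebook := by
  by_cases hc : codebook = []
  · subst hc; rfl
  · have hd : (PySem.Dict.mk codebook : PySem.Dict Int (Int × Int)).keys.Nodup := hpre
    -- the key-iteration loop rebuilds the item list
    have hlist : (PySem.Dict.mk codebook : PySem.Dict Int (Int × Int)).keys.foldl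
        (fun acc k => acc ++ [(k, (PySem.Dict.mk codebook : PySem.Dict Int (Int × Int)).getD k (0, 0))]) []
        = codebook := by
      rw [PySem.List.foldl_append_singleton_eq_map]
      rw [← PySem.Dict.items_eq_map_keys _ hd (0, 0)]
      rfl
    have hsort := pv_sort_eq codebook hpre
    have hperm : (PySem.List.sorted2 codebook (fun kv => kv.2.1) (fun kv => kv.1) false).Perm codebook :=
      PySem.List.sorted2_perm codebook _ _ false
    have hpw : (PySem.List.sorted2 codebook (fun kv => kv.2.1) (fun kv => kv.1) false).Pairwise pvLexR :=
      pv_sortB_pairwise codebook hpre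
    have hsnd : ((PySem.List.sorted2 codebook (fun kv => kv.2.1) (fun kv => kv.1) false).map
        (fun p => p.1)).Nodup := ((hperm.map (fun p => p.1)).nodup_iff).mpr hpre
    rcases hsl : PySem.List.sorted2 codebook (fun kv => kv.2.1) (fun kv => kv.1) false with _ | ⟨p0, rest⟩
    · exact absurd (hsl ▸ hperm).symm.eq_nil hc
    · rw [hsl] at hpw hsnd
      have hkne : ∀ q ∈ rest, q.1 ≠ p0.1 := by
        rcases List.pairwise_cons.mp (List.pairwise_map.mp hsnd) with ⟨h, _⟩
        exact fun q hq he => (h q hq) he.symm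
      have hrestnd : (rest.map (fun p => p.1)).Nodup := (List.pairwise_cons.mp (List.pairwise_map.mp hsnd)).2 |> List.pairwise_map.mpr
      have hlen : (p0 :: rest).Pairwise (fun a b => a.2.1 ≤ b.2.1) :=
        hpw.imp (fun h => by unfold pvLexR at h; omega)
      -- A's side
      have hA : build_canonical_codebook codebook
          = [(p0.1, p0.2.1, 0)] ++ pvCodesFrom p0.2.1 0 rest := by
        unfold build_canonical_codebook
        rw [if_neg hc]
        simp only [hlist, hsort, hsl]
        have hfresh : ∀ q ∈ rest,
            ((PySem.Dict.empty : PySem.Dict Int (Int × Int)).insert p0.1 (p0.2.1, 0)).contains q.1 = false := by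
          intro q hq
          rw [PySem.Dict.contains_insert]
          simp [PySem.Dict.contains_empty, hkne q hq]
        rw [pv_aloop_items rest (p0.2.1, 0) 0 _ hfresh hrestnd]
        rfl
      -- B's side
      have hB : build_canonical_codebook_alt codebook
          = [(p0.1, p0.2.1, 0)] ++ pvCodesFrom p0.2.1 0 rest := by
        unfold build_canonical_codebook_alt
        rw [if_neg hc]
        simp only [hsl]
        have hfold := PySem.Dict.items_foldl_insert_fresh
          (l := PySem.List.enumerate (p0 :: rest) 0)
          (k := fun ip : Int × Int × Int × Int => ip.2.1)
          (v := fun ip : Int × Int × Int × Int =>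
            (PySem.List.pyGetD ((p0 :: rest).map (fun kv => kv.2.1)) ip.1 0,
             ((PySem.List.pyRange 0 ip.1 1).map
               (fun j => (1:Int) <<< (PySem.List.pyGetD ((p0 :: rest).map (fun kv => kv.2.1)) ip.1 0
                 - PySem.List.pyGetD ((p0 :: rest).map (fun kv => kv.2.1)) j 0).toNat)).sum))
          (d := PySem.Dict.empty)
          (by intro a _; simp [PySem.Dict.contains_empty])
          (by rw [pv_enumerate_map_keys]; exact hsnd)
        rw [hfold]
        rw [PySem.List.enumerate_cons]
        simp only [List.map_cons]
        have hbr := pv_bridge (p0.2.1 :: rest.map (fun kv => kv.2.1)) rest [p0.2.1] p0.2.1 0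
          (by simp) (by simp) ?_ ?_ ?_
        · have hlen1 : ((([p0.2.1] : List Int).length : Nat) : Int) = 1 := by simp
          rw [hlen1] at hbr
          simp only [show (PySem.Dict.empty : PySem.Dict Int (Int × Int)).items = [] from rfl,
            List.nil_append, zero_add, List.singleton_append]
          congr 1
          · simp [PySem.List.pyGetD_zero_cons,
              show PySem.List.pyRange 0 0 1 = [] from rfl]
          · exact hbr.symm
        · intro q hq
          exact (List.pairwise_cons.mp hlen).1 q hq
        · exact List.pairwise_map.mpr ((List.pairwise_cons.mp hlen).2.imp (fun h => h))
        · simp [Int.shiftLeft_eq]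
      rw [hA, hB]

-- ===== VERDICT (by name: the statement is the Claim_ definition above) =====
theorem build_canonical_codebook_spec : Claim_equal_build_canonical_codebook := by
  intro codebook _ hpre
  unfold Spec_build_canonical_codebook
  exact pv_main codebook hpre
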